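-- pv_equiv track=rewrite | github.com/JD-P/lw-survey-analysis | survey_analysis.py | tally_answers
-- ===== SOURCE A (Python) =====
-- def tally_answers(results, fieldnames):
--     """Tally the answers to questions in results."""
--     question_tallies = dict().fromkeys(fieldnames)
--     for question in question_tallies:
--         question_tallies[question] = dict()
--     for row in results:
--         for question in row:
--             if row[question].strip() and row[question].strip() != "N/A":
--                 if row[question].strip() not in question_tallies[question]:
--                     question_tallies[question][row[question].strip()] = 1
--                 else:
--                     question_tallies[question][row[question].strip()] += 1
--     return question_tallies
-- ===== SOURCE B (Python) =====
-- def tally_answers(results, fieldnames):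
--     """Tally the answers to questions in results (question-major pass)."""
--     tallies = {}
--     for question in fieldnames:
--         counts = {}
--         for row in results:
--             if question in row:
--                 answer = row[question].strip()
--                 if answer and answer != "N/A":
--                     counts[answer] = counts.get(answer, 0) + 1
--         tallies[question] = counts
--     return tallies
-- ===== Notes on version B (the rewrite author's own statement) =====
-- stated objective: alternative
-- what changed: Row-major single pass mutating a pre-seeded dict-of-dicts is replaced by a question-major double loop: for each fieldname, scan all rows and count that question's valid answers into a fresh counter, so the seeding pass and the membership/else branch on the inner dict disappear.
-- crash fix: On rows containing a non-blank, non-'N/A' answer under a question missing from fieldnames, A raises KeyError while B simply ignores the unknown question and returns the tallies for the listed fieldnames. — e.g. on tally_answers([[("x", "a")]], []): A raises KeyError, B returns []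
import Mathlib
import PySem

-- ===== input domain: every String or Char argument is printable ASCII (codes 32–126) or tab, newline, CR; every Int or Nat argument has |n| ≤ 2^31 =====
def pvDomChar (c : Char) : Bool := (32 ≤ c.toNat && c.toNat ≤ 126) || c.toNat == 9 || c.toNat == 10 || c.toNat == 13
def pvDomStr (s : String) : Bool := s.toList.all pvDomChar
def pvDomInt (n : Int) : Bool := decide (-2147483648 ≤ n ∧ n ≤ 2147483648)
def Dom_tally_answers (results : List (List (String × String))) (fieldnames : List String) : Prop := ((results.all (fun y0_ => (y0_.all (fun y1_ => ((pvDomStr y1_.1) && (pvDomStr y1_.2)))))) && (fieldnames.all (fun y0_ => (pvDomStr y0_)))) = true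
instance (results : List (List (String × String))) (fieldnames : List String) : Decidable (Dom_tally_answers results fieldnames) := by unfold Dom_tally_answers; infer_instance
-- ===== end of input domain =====

-- B replaces A's row-major pass over a pre-seeded dict-of-dicts by a question-major double loop
-- (one fresh counter per fieldname); equal cost, different decomposition (objective: alternative).

-- ===== PORT A =====
def tally_answers (results : List (List (String × String))) (fieldnames : List String) : List (String × List (String × Int)) :=
  -- question_tallies = dict().fromkeys(fieldnames); for question in question_tallies: [question] = dict()
  let qt0 : PySem.Dict String (PySem.Dict String Int) :=
    fieldnames.foldl (fun d q => d.insert q PySem.Dict.empty) PySem.Dict.empty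
  let qt :=
    results.foldl (fun qt row =>
      row.foldl (fun qt kv =>
        let a := PySem.Str.strip kv.2          -- row[question].strip()
        if a ≠ "" ∧ a ≠ "N/A" then
          match qt.get? kv.1 with
          | none => qt                          -- Python raises KeyError here; excluded by Pre_
          | some c =>
            if c.contains a = false then qt.insert kv.1 (c.insert a 1)
            else qt.insert kv.1 (c.insert a (c.getD a 0 + 1))
        else qt) qt) qt0
  qt.items.map (fun p => (p.1, p.2.items))

-- ===== PORT B =====
def tally_answers_alt (results : List (List (String × String))) (fieldnames : List String) : List (String × List (String × Int)) :=
  let tallies : PySem.Dict String (PySem.Dict String Int) :=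
    fieldnames.foldl (fun t q =>
      let counts : PySem.Dict String Int :=
        results.foldl (fun c row =>
          match (PySem.Dict.mk row).get? q with  -- if question in row: row[question]
          | none => c
          | some v =>
            let answer := PySem.Str.strip v
            if answer ≠ "" ∧ answer ≠ "N/A" then c.insert answer (c.getD answer 0 + 1) else c)
          PySem.Dict.empty
      t.insert q counts) PySem.Dict.empty
  tallies.items.map (fun p => (p.1, p.2.items))

-- ===== PRECONDITION & SPEC =====
-- Pre_ excludes (a) inputs where A raises KeyError (a non-blank, non-"N/A" answer under a question
-- not in fieldnames) and (b) rows with duplicate question keys, which cannot arise from a Python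
-- dict row and whose association-list reading is ambiguous.
def Pre_tally_answers (results : List (List (String × String))) (fieldnames : List String) : Prop :=
  ∀ row ∈ results, (row.map Prod.fst).Nodup ∧
    ∀ kv ∈ row, (PySem.Str.strip kv.2 ≠ "" ∧ PySem.Str.strip kv.2 ≠ "N/A") → kv.1 ∈ fieldnames
instance (results : List (List (String × String))) (fieldnames : List String) : Decidable (Pre_tally_answers results fieldnames) := by unfold Pre_tally_answers; infer_instance

def pvWitness_tally_answers : (List (List (String × String))) × List String :=
  ([[("q", " a "), ("r", "N/A")], [("q", "a")]], ["q", "r"])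

-- On inputs with a non-blank, non-"N/A" answer filed under a question missing from fieldnames,
-- A raises KeyError while B ignores the unknown question and returns the tallies for fieldnames.
def Raises_tally_answers (results : List (List (String × String))) (fieldnames : List String) : Prop :=
  ∃ row ∈ results, ∃ kv ∈ row, kv.1 ∉ fieldnames ∧
    PySem.Str.strip ((row.reverse.lookup kv.1).getD "") ≠ "" ∧
    PySem.Str.strip ((row.reverse.lookup kv.1).getD "") ≠ "N/A"
instance (results : List (List (String × String))) (fieldnames : List String) : Decidable (Raises_tally_answers results fieldnames) := by unfold Raises_tally_answers; infer_instance

def pvRaiseWitness_tally_answers : (List (List (String × String))) × List String :=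
  ([[("x", "a")]], [])
def pvRaiseWitnessOut_tally_answers : List (String × List (String × Int)) := []

def Spec_tally_answers (results : List (List (String × String))) (fieldnames : List String) (out : List (String × List (String × Int))) : Prop := out = tally_answers_alt results fieldnames
instance (results : List (List (String × String))) (fieldnames : List String) (out : List (String × List (String × Int))) : Decidable (Spec_tally_answers results fieldnames out) := by unfold Spec_tally_answers; infer_instance

-- ===== CLAIM (what is proved, stated in full; the proofs are below) =====
def Claim_equal_tally_answers : Prop := ∀ (results : List (List (String × String))) (fieldnames : List String), Dom_tally_answers results fieldnames → Pre_tally_answers results fieldnames → Spec_tally_answers results fieldnames (tally_answers results fieldnames)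
def Claim_raises_tally_answers : Prop := (∀ (results : List (List (String × String))) (fieldnames : List String), Dom_tally_answers results fieldnames → Raises_tally_answers results fieldnames → ¬ Pre_tally_answers results fieldnames) ∧ (Dom_tally_answers (pvRaiseWitness_tally_answers.1) (pvRaiseWitness_tally_answers.2) ∧ Raises_tally_answers (pvRaiseWitness_tally_answers.1) (pvRaiseWitness_tally_answers.2) ∧ tally_answers_alt (pvRaiseWitness_tally_answers.1) (pvRaiseWitness_tally_answers.2) = pvRaiseWitnessOut_tally_answers)

-- ===== LEMMAS AND PROOFS =====

-- A's one-event update on the outer dict (the body of A's inner loop).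
def pvStepA (qt : PySem.Dict String (PySem.Dict String Int)) (kv : String × String) :
    PySem.Dict String (PySem.Dict String Int) :=
  let a := PySem.Str.strip kv.2
  if a ≠ "" ∧ a ≠ "N/A" then
    match qt.get? kv.1 with
    | none => qt
    | some c =>
      if c.contains a = false then qt.insert kv.1 (c.insert a 1)
      else qt.insert kv.1 (c.insert a (c.getD a 0 + 1))
  else qt

-- B's per-row update on one question's counter (the body of B's inner loop).
def pvStepB (q : String) (c : PySem.Dict String Int) (row : List (String × String)) :
    PySem.Dict String Int :=
  match (PySem.Dict.mk row).get? q with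
  | none => c
  | some v =>
    let answer := PySem.Str.strip v
    if answer ≠ "" ∧ answer ≠ "N/A" then c.insert answer (c.getD answer 0 + 1) else c

def pvBump (c : PySem.Dict String Int) (a : String) : PySem.Dict String Int :=
  c.insert a (c.getD a 0 + 1)

-- the stripped valid answers a list of (question, answer) pairs contributes to question q
def pvEvs (q : String) (es : List (String × String)) : List String :=
  es.filterMap (fun kv =>
    if kv.1 = q ∧ PySem.Str.strip kv.2 ≠ "" ∧ PySem.Str.strip kv.2 ≠ "N/A"
    then some (PySem.Str.strip kv.2) else none)

-- the (≤ 1) stripped valid answers one row contributes to q, read dict-style (first match)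
def pvContrib (q : String) (row : List (String × String)) : List String :=
  match (PySem.Dict.mk row).get? q with
  | none => []
  | some v =>
    if PySem.Str.strip v ≠ "" ∧ PySem.Str.strip v ≠ "N/A" then [PySem.Str.strip v] else []

lemma pvStepA_insert (qt : PySem.Dict String (PySem.Dict String Int)) (kv : String × String)
    (c : PySem.Dict String Int)
    (hval : PySem.Str.strip kv.2 ≠ "" ∧ PySem.Str.strip kv.2 ≠ "N/A")
    (hq : qt.get? kv.1 = some c) :
    pvStepA qt kv = qt.insert kv.1 (pvBump c (PySem.Str.strip kv.2)) := by
  by_cases hc : c.contains (PySem.Str.strip kv.2) = false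
  · have h0 : c.getD (PySem.Str.strip kv.2) 0 = 0 := PySem.Dict.getD_of_not_contains c 0 hc
    simp [pvStepA, hval, hq, hc, pvBump, h0]
  · simp [pvStepA, hval, hq, hc, pvBump]

lemma get?_foldl_pvStepA (es : List (String × String))
    (qt : PySem.Dict String (PySem.Dict String Int)) (q : String) :
    (es.foldl pvStepA qt).get? q
      = (qt.get? q).map (fun c => (pvEvs q es).foldl pvBump c) := by
  induction es generalizing qt with
  | nil => cases h : qt.get? q <;> simp [pvEvs, h]
  | cons kv es ih =>
    by_cases hval : PySem.Str.strip kv.2 ≠ "" ∧ PySem.Str.strip kv.2 ≠ "N/A"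
    · cases hq : qt.get? kv.1 with
      | none =>
        have hA : pvStepA qt kv = qt := by simp [pvStepA, hval, hq]
        by_cases hkq : kv.1 = q
        · subst hkq
          simp [List.foldl_cons, hA, ih, hq]
        · have hev : pvEvs q (kv :: es) = pvEvs q es := by
            simp [pvEvs, hkq]
          simp [List.foldl_cons, hA, ih, hev]
      | some c =>
        have hA := pvStepA_insert qt kv c hval hq
        by_cases hkq : kv.1 = q
        · subst hkq
          have hev : pvEvs kv.1 (kv :: es) = PySem.Str.strip kv.2 :: pvEvs kv.1 es := by
            simp [pvEvs, hval]
          rw [List.foldl_cons, hA, ih, PySem.Dict.get?_insert_self, hq, hev]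
          simp
        · have hev : pvEvs q (kv :: es) = pvEvs q es := by
            simp [pvEvs, hkq]
          rw [List.foldl_cons, hA, ih, PySem.Dict.get?_insert_of_ne _ _ (Ne.symm hkq), hev]
    · have hA : pvStepA qt kv = qt := by simp [pvStepA, hval]
      have hev : pvEvs q (kv :: es) = pvEvs q es := by
        simp only [pvEvs, List.filterMap_cons]
        rw [if_neg (by tauto)]
      simp [List.foldl_cons, hA, ih, hev]

lemma keys_foldl_pvStepA (es : List (String × String))
    (qt : PySem.Dict String (PySem.Dict String Int)) :
    (es.foldl pvStepA qt).keys = qt.keys := by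
  induction es generalizing qt with
  | nil => rfl
  | cons kv es ih =>
    rw [List.foldl_cons, ih]
    by_cases hval : PySem.Str.strip kv.2 ≠ "" ∧ PySem.Str.strip kv.2 ≠ "N/A"
    · cases hq : qt.get? kv.1 with
      | none => simp [pvStepA, hval, hq]
      | some c =>
        rw [pvStepA_insert qt kv c hval hq]
        exact PySem.Dict.keys_insert_of_contains _ _
          (by rw [PySem.Dict.contains_eq_isSome_get?, hq]; rfl)
    · simp [pvStepA, hval]

lemma pvStepB_eq (q : String) (c : PySem.Dict String Int) (row : List (String × String)) :
    pvStepB q c row = (pvContrib q row).foldl pvBump c := by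
  cases hm : (PySem.Dict.mk row).get? q with
  | none => simp [pvStepB, pvContrib, hm]
  | some v =>
    by_cases hval : PySem.Str.strip v ≠ "" ∧ PySem.Str.strip v ≠ "N/A" <;>
      simp [pvStepB, pvContrib, hm, hval, pvBump]

lemma foldl_pvStepB (q : String) (rows : List (List (String × String)))
    (c : PySem.Dict String Int) :
    rows.foldl (pvStepB q) c = (rows.flatMap (pvContrib q)).foldl pvBump c := by
  induction rows generalizing c with
  | nil => rfl
  | cons row rows ih =>
    rw [List.foldl_cons, List.flatMap_cons, List.foldl_append, pvStepB_eq, ih]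

lemma pvEvs_nil_of_not_mem (q : String) (row : List (String × String))
    (h : q ∉ row.map Prod.fst) : pvEvs q row = [] := by
  rw [pvEvs, List.filterMap_eq_nil_iff]
  intro kv hkv
  rw [if_neg]
  rintro ⟨h1, -⟩
  exact h (h1 ▸ List.mem_map_of_mem hkv)

lemma pvEvs_row_eq (q : String) (row : List (String × String))
    (h : (row.map Prod.fst).Nodup) : pvEvs q row = pvContrib q row := by
  induction row with
  | nil => rfl
  | cons kv row ih =>
    obtain ⟨k, v⟩ := kv
    rw [List.map_cons, List.nodup_cons] at h
    by_cases hkq : k = q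
    · subst hkq
      have htail : pvEvs k row = [] := pvEvs_nil_of_not_mem k row h.1
      simp only [pvEvs, pvContrib, List.filterMap_cons, PySem.Dict.get?_mk_cons,
        beq_self_eq_true, if_true] at htail ⊢
      by_cases hval : PySem.Str.strip v ≠ "" ∧ PySem.Str.strip v ≠ "N/A"
      · rw [if_pos (by exact ⟨by simp, hval⟩), if_pos hval]
        simpa using htail
      · rw [if_neg (by tauto), if_neg hval]
        exact htail
    · have hbq : (k == q) = false := by simp [hkq]
      simp only [pvEvs, pvContrib, List.filterMap_cons, PySem.Dict.get?_mk_cons, hbq,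
        Bool.false_eq_true, if_false] at ih ⊢
      rw [if_neg (by simp [hkq])]
      exact ih h.2

lemma pvEvs_flatten (q : String) (rows : List (List (String × String))) :
    pvEvs q rows.flatten = rows.flatMap (fun row => pvEvs q row) := by
  induction rows with
  | nil => rfl
  | cons row rows ih =>
    rw [List.flatten_cons, List.flatMap_cons, ← ih, pvEvs, pvEvs, pvEvs, List.filterMap_append]

lemma get?_foldl_insert_fn (f : String → PySem.Dict String Int) (qs : List String)
    (d : PySem.Dict String (PySem.Dict String Int)) (x : String) :
    (qs.foldl (fun t q => t.insert q (f q)) d).get? x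
      = if x ∈ qs then some (f x) else d.get? x := by
  induction qs generalizing d with
  | nil => simp
  | cons q qs ih =>
    rw [List.foldl_cons, ih]
    by_cases hx : x ∈ qs
    · simp [hx]
    · by_cases hxq : x = q
      · subst hxq; simp [hx, PySem.Dict.get?_insert_self]
      · rw [PySem.Dict.get?_insert_of_ne _ _ hxq]; simp [hx, hxq]

-- the central identity: both final outer dicts are equal, entry by entry and in order
lemma dicts_eq (results : List (List (String × String))) (fieldnames : List String)
    (hpre : Pre_tally_answers results fieldnames) :
    (results.foldl (fun qt row => row.foldl pvStepA qt)
        (fieldnames.foldl (fun d q => d.insert q PySem.Dict.empty) PySem.Dict.empty))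
      = fieldnames.foldl (fun t q => t.insert q (results.foldl (pvStepB q) PySem.Dict.empty))
          PySem.Dict.empty := by
  have hflat :
      results.foldl (fun qt row => row.foldl pvStepA qt)
          (fieldnames.foldl (fun d q => d.insert q PySem.Dict.empty) PySem.Dict.empty)
        = (results.flatten).foldl pvStepA
            (fieldnames.foldl (fun d q => d.insert q PySem.Dict.empty) PySem.Dict.empty) :=
    Eq.symm List.foldl_flatten
  -- keys of both sides
  have hkA : (results.foldl (fun qt row => row.foldl pvStepA qt)
      (fieldnames.foldl (fun d q => d.insert q PySem.Dict.empty) PySem.Dict.empty)).keys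
      = PySem.Set.update [] fieldnames := by
    rw [hflat, keys_foldl_pvStepA,
      PySem.Dict.keys_foldl_insert (f := fun _ _ => PySem.Dict.empty), PySem.Dict.keys_empty]
  have hkB : (fieldnames.foldl
      (fun t q => t.insert q (results.foldl (pvStepB q) PySem.Dict.empty)) PySem.Dict.empty).keys
      = PySem.Set.update [] fieldnames := by
    rw [PySem.Dict.keys_foldl_insert (f := fun t q => results.foldl (pvStepB q) PySem.Dict.empty),
      PySem.Dict.keys_empty]
  have hndA : (results.foldl (fun qt row => row.foldl pvStepA qt)
      (fieldnames.foldl (fun d q => d.insert q PySem.Dict.empty) PySem.Dict.empty)).keys.Nodup := by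
    rw [hkA, PySem.Set.update_nil_left]; exact PySem.Set.nodup_ofList fieldnames
  have hndB : (fieldnames.foldl
      (fun t q => t.insert q (results.foldl (pvStepB q) PySem.Dict.empty))
      PySem.Dict.empty).keys.Nodup := by
    rw [hkB, PySem.Set.update_nil_left]; exact PySem.Set.nodup_ofList fieldnames
  apply PySem.Dict.ext
  rw [PySem.Dict.items_eq_map_keys _ hndA PySem.Dict.empty,
    PySem.Dict.items_eq_map_keys _ hndB PySem.Dict.empty, hkA, hkB]
  apply List.map_congr_left
  intro q hq
  rw [PySem.Set.update_nil_left] at hq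
  have hqf : q ∈ fieldnames := (PySem.Set.mem_ofList _ _).1 hq
  -- the value stored at q on each side
  have hgA : (results.foldl (fun qt row => row.foldl pvStepA qt)
      (fieldnames.foldl (fun d q => d.insert q PySem.Dict.empty) PySem.Dict.empty)).get? q
      = some ((pvEvs q results.flatten).foldl pvBump PySem.Dict.empty) := by
    rw [hflat, get?_foldl_pvStepA,
      get?_foldl_insert_fn (fun _ => PySem.Dict.empty) fieldnames _ q, if_pos hqf]
    rfl
  have hgB : (fieldnames.foldl
      (fun t q => t.insert q (results.foldl (pvStepB q) PySem.Dict.empty))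
      PySem.Dict.empty).get? q
      = some (results.foldl (pvStepB q) PySem.Dict.empty) := by
    rw [get?_foldl_insert_fn (fun q => results.foldl (pvStepB q) PySem.Dict.empty) fieldnames _ q,
      if_pos hqf]
  have hval : (pvEvs q results.flatten).foldl pvBump PySem.Dict.empty
      = results.foldl (pvStepB q) PySem.Dict.empty := by
    rw [foldl_pvStepB, pvEvs_flatten,
      List.flatMap_congr (fun row hrow => pvEvs_row_eq q row (hpre row hrow).1)]
  rw [PySem.Dict.getD_eq_get?_getD, PySem.Dict.getD_eq_get?_getD, hgA, hgB, hval]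

lemma lookup_mem {α β : Type} [BEq α] [LawfulBEq α] (l : List (α × β)) (a : α) (b : β)
    (h : l.lookup a = some b) : (a, b) ∈ l := by
  induction l with
  | nil => simp [List.lookup] at h
  | cons kv l ih =>
    obtain ⟨k, v⟩ := kv
    rw [List.lookup_cons] at h
    cases hk : a == k with
    | true =>
      rw [hk] at h
      simp only [Option.some.injEq] at h
      subst h
      have : a = k := by simpa using hk
      subst this
      exact List.mem_cons_self
    | false =>
      rw [hk] at h
      exact List.mem_cons_of_mem _ (ih h)

-- ===== VERDICT (by name: the statement is the Claim_ definition above) =====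
theorem tally_answers_spec : Claim_equal_tally_answers := by
  intro results fieldnames _ hpre
  show tally_answers results fieldnames = tally_answers_alt results fieldnames
  exact congrArg (fun d => d.items.map (fun p => (p.1, p.2.items)))
    (dicts_eq results fieldnames hpre)

def tally_answers_raises : Claim_raises_tally_answers := by
  unfold Claim_raises_tally_answers
  constructor
  · rintro results fieldnames _ ⟨row, hrow, kv, hkv, hnf, h1, h2⟩ hpre
    cases hl : row.reverse.lookup kv.1 with
    | none =>
      rw [hl] at h1
      exact h1 rfl
    | some v =>
      rw [hl] at h1 h2
      have hmem : (kv.1, v) ∈ row := by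
        have := lookup_mem _ _ _ hl
        exact List.mem_reverse.1 this
      exact hnf (((hpre row hrow).2 (kv.1, v) hmem) ⟨h1, h2⟩)
  · exact ⟨by decide, by decide, by decide⟩
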